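-- pv_equiv track=rewrite | github.com/kochlisGit/Big-Data-Algorithms | multihash-pcy/multihash_pcy.py | first_pass
-- ===== SOURCE A (Python) =====
-- def hashFunc1(itemset, num_of_buckets):
--     product = 1
--     for itemId in itemset:
--         product *= itemId
--     return product % num_of_buckets
--
-- def hashFunc2(itemset, num_of_buckets):
--     return sum(itemset) % num_of_buckets
--
-- def first_pass(transactions, num_of_buckets):
--     itemList = dict()
--     hashTable1 = [ 0 for i in range(num_of_buckets) ]
--     hashTable2 = [ 0 for i in range(num_of_buckets) ]
--
--     for basket in transactions:
--         size = len(basket)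
--         for i in range(size):
--             item1 = int( basket[i] )
--             if item1 in itemList:
--                 itemList[item1] += 1
--             else:
--                 itemList[item1] = 1
--
--             for j in range(i+1, size):
--                 item2 = int( basket[j] )
--                 hashId1 = hashFunc1( [item1, item2], num_of_buckets )
--                 hashTable1[hashId1] += 1
--                 hashId2 = hashFunc2( [item1, item2], num_of_buckets )
--                 hashTable2[hashId2] += 1
--     return itemList, hashTable1, hashTable2
-- ===== SOURCE B (Python) =====
-- def first_pass(transactions, num_of_buckets):
--     itemList = dict()
--     hashTable1 = [0] * num_of_buckets
--     hashTable2 = [0] * num_of_buckets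
--
--     for basket in transactions:
--         counts = dict()
--         for item in basket:
--             value = int(item)
--             itemList[value] = itemList.get(value, 0) + 1
--             r = value % num_of_buckets
--             counts[r] = counts.get(r, 0) + 1
--         for r1 in counts:
--             c1 = counts[r1]
--             for r2 in counts:
--                 if r1 <= r2:
--                     if r1 == r2:
--                         cnt = c1 * (c1 - 1) // 2
--                     else:
--                         cnt = c1 * counts[r2]
--                     hashTable1[(r1 * r2) % num_of_buckets] += cnt
--                     hashTable2[(r1 + r2) % num_of_buckets] += cnt
--     return itemList, hashTable1, hashTable2
-- ===== Notes on version B (the rewrite author's own statement) =====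
-- stated objective: faster
-- what changed: The O(size^2) inner pair loop per basket is replaced by a residue histogram over the buckets: count items by value%m in one pass, then add c[r1]*c[r2] (or c[r]*(c[r]-1)//2 for r1==r2) pairs at once to each hash bucket, an O(size + m^2) convolution over residue pairs.
-- outside the precondition, e.g. on first_pass([[1], [2]], 0): A returns ({1: 1, 2: 1}, [], []), B raises ZeroDivisionError
import Mathlib
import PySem

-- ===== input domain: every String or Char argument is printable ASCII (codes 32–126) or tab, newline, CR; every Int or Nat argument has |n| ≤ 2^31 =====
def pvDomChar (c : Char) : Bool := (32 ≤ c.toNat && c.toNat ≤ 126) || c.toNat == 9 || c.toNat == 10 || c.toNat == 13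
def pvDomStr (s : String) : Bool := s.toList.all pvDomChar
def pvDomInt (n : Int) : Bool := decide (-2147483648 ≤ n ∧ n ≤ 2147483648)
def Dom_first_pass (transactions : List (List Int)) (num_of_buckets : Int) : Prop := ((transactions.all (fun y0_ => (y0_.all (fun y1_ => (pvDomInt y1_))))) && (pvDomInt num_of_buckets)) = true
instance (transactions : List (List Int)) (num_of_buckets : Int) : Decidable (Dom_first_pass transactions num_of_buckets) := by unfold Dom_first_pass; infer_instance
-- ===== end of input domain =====

-- B replaces A's quadratic per-basket pair loop by a residue histogram and an m×m
-- convolution over residue pairs (objective: faster; equivalence of return values).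

-- ===== PORT A =====
def hashFunc1 (itemset : List Int) (num_of_buckets : Int) : Int :=
  PySem.Int.mod (itemset.foldl (fun product itemId => product * itemId) 1) num_of_buckets

def hashFunc2 (itemset : List Int) (num_of_buckets : Int) : Int :=
  PySem.Int.mod itemset.sum num_of_buckets

-- t[i] += 1 (read then write; pySetD/pyGetD are exact for the in-range indices Pre_ guarantees)
def pvIncAt (t : List Int) (i : Int) : List Int :=
  PySem.List.pySetD t i (PySem.List.pyGetD t i 0 + 1)

-- 'if item1 in itemList: itemList[item1] += 1 else: itemList[item1] = 1'
def pvDictInc (d : PySem.Dict Int Int) (item1 : Int) : PySem.Dict Int Int :=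
  if d.contains item1 then d.insert item1 (d.getD item1 0 + 1) else d.insert item1 1

-- 'for j in range(i+1, size)': the strict tail of the basket after position i
def aPairLoop (num_of_buckets item1 : Int) :
    List Int → List Int × List Int → List Int × List Int
  | [], tabs => tabs
  | item2 :: rest, (t1, t2) =>
      aPairLoop num_of_buckets item1 rest
        (pvIncAt t1 (hashFunc1 [item1, item2] num_of_buckets),
         pvIncAt t2 (hashFunc2 [item1, item2] num_of_buckets))

-- 'for i in range(size)' with basket[i] and inner range(i+1, size): structural recursion on the same elements
def aBasketLoop (num_of_buckets : Int) :
    List Int → PySem.Dict Int Int × List Int × List Int → PySem.Dict Int Int × List Int × List Int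
  | [], st => st
  | item1 :: rest, (d, t1, t2) =>
      aBasketLoop num_of_buckets rest
        (pvDictInc d item1, aPairLoop num_of_buckets item1 rest (t1, t2))

def first_pass (transactions : List (List Int)) (num_of_buckets : Int) :
    (List (Int × Int)) × List Int × List Int :=
  let res := transactions.foldl (fun st basket => aBasketLoop num_of_buckets basket st)
    (PySem.Dict.empty,
     (PySem.List.pyRange 0 num_of_buckets 1).map (fun _ => (0 : Int)),
     (PySem.List.pyRange 0 num_of_buckets 1).map (fun _ => (0 : Int)))
  (res.1.items, res.2.1, res.2.2)

-- ===== PORT B =====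
-- t[i] += n (read then write)
def bBump (t : List Int) (i : Int) (n : Int) : List Int :=
  PySem.List.pySetD t i (PySem.List.pyGetD t i 0 + n)

-- 'for r1 in counts: for r2 in counts: if r1 <= r2: …'; counts[r] on a present key is
-- ported as getD _ r 0 (exact: these lookups never miss)
def bResLoop (num_of_buckets : Int) (counts : PySem.Dict Int Int)
    (tabs : List Int × List Int) : List Int × List Int :=
  counts.keys.foldl (fun tabs r1 =>
    let c1 := counts.getD r1 0
    counts.keys.foldl (fun tabs r2 =>
      if r1 ≤ r2 then
        let cnt := if r1 = r2 then PySem.Int.floordiv (c1 * (c1 - 1)) 2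
                   else c1 * counts.getD r2 0
        (bBump tabs.1 (PySem.Int.mod (r1 * r2) num_of_buckets) cnt,
         bBump tabs.2 (PySem.Int.mod (r1 + r2) num_of_buckets) cnt)
      else tabs) tabs) tabs

def first_pass_alt (transactions : List (List Int)) (num_of_buckets : Int) :
    (List (Int × Int)) × List Int × List Int :=
  let res := transactions.foldl (fun st basket =>
      let dc := basket.foldl
          (fun (dc : PySem.Dict Int Int × PySem.Dict Int Int) item =>
            let r := PySem.Int.mod item num_of_buckets
            (dc.1.insert item (dc.1.getD item 0 + 1),
             dc.2.insert r (dc.2.getD r 0 + 1)))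
        (st.1, PySem.Dict.empty)
      let tabs := bResLoop num_of_buckets dc.2 (st.2.1, st.2.2)
      (dc.1, tabs.1, tabs.2))
    (PySem.Dict.empty,
     List.replicate num_of_buckets.toNat (0 : Int),
     List.replicate num_of_buckets.toNat (0 : Int))
  (res.1.items, res.2.1, res.2.2)

-- ===== PRECONDITION & SPEC =====
-- Pre_ excludes num_of_buckets ≤ 0: there A raises (ZeroDivisionError / IndexError on the
-- empty hash tables) as soon as any basket has ≥ 2 items and only returns on degenerate
-- inputs whose baskets all have ≤ 1 item; B raises (ZeroDivisionError) on any nonempty basket.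
def Pre_first_pass (transactions : List (List Int)) (num_of_buckets : Int) : Prop :=
  0 < num_of_buckets
instance (transactions : List (List Int)) (num_of_buckets : Int) :
    Decidable (Pre_first_pass transactions num_of_buckets) := by
  unfold Pre_first_pass; infer_instance

def pvWitness_first_pass : List (List Int) × Int := ([[1, 2, 5], [3]], 2)

def Spec_first_pass (transactions : List (List Int)) (num_of_buckets : Int)
    (out : (List (Int × Int)) × List Int × List Int) : Prop :=
  out = first_pass_alt transactions num_of_buckets
instance (transactions : List (List Int)) (num_of_buckets : Int)
    (out : (List (Int × Int)) × List Int × List Int) :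
    Decidable (Spec_first_pass transactions num_of_buckets out) := by
  unfold Spec_first_pass; infer_instance

-- ===== CLAIM (what is proved, stated in full; the proofs are below) =====
def Claim_equal_first_pass : Prop := ∀ (transactions : List (List Int)) (num_of_buckets : Int), Dom_first_pass transactions num_of_buckets → Pre_first_pass transactions num_of_buckets → Spec_first_pass transactions num_of_buckets (first_pass transactions num_of_buckets)

-- ===== LEMMAS AND PROOFS =====

-- proof-only abbreviations
def pairsList : List Int → List (Int × Int)
  | [] => []
  | a :: rest => rest.map (fun b => (a, b)) ++ pairsList rest

def rpairsList (m : Int) : List (Int × Int) :=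
  (PySem.List.pyRange 0 m 1).flatMap (fun r1 => (PySem.List.pyRange r1 m 1).map (fun r2 => (r1, r2)))

def wcnt (rs : List Int) (r1 r2 : Int) : Int :=
  if r1 = r2 then (rs.count r1 : Int) * ((rs.count r1 : Int) - 1) / 2
  else (rs.count r1 : Int) * (rs.count r2 : Int)

def applyW (t : List Int) (g : Nat → Int) : List Int := t.mapIdx (fun k v => v + g k)

def setInc (t : List Int) (k : Nat) (n : Int) : List Int := t.set k (t.getD k 0 + n)

lemma applyW_zero (t : List Int) : applyW t (fun _ => 0) = t := by
  apply List.ext_getElem <;> simp [applyW]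

lemma applyW_applyW (t : List Int) (g h : Nat → Int) :
    applyW (applyW t g) h = applyW t (fun k => g k + h k) := by
  apply List.ext_getElem
  · simp [applyW]
  · intro i h1 h2
    simp only [applyW, List.getElem_mapIdx]
    omega

lemma applyW_congr (t : List Int) (g h : Nat → Int)
    (hgh : ∀ k, k < t.length → g k = h k) : applyW t g = applyW t h := by
  apply List.ext_getElem
  · simp [applyW]
  · intro k h1 h2
    simp only [applyW, List.getElem_mapIdx]
    rw [hgh k (by simpa [applyW] using h1)]

lemma setInc_eq_applyW (t : List Int) (k : Nat) (n : Int) :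
    setInc t k n = applyW t (fun j => if j = k then n else 0) := by
  apply List.ext_getElem
  · simp [setInc, applyW]
  · intro j h1 h2
    simp only [setInc, applyW, List.getElem_mapIdx, List.getElem_set]
    by_cases hjk : j = k
    · subst hjk
      have hlt : j < t.length := by simpa [setInc] using h1
      simp [List.getD, List.getElem?_eq_getElem hlt]
    · simp [hjk, Ne.symm hjk]

lemma bBump_eq_setInc (t : List Int) (i n : Int) (h0 : 0 ≤ i) (h : i < (t.length : Int)) :
    bBump t i n = setInc t i.toNat n := by
  have hi : i = (i.toNat : Int) := (Int.toNat_of_nonneg h0).symm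
  have hlen : i.toNat < t.length := by omega
  have hg : PySem.List.pyGetD t i 0 = t.getD i.toNat 0 := by
    rw [hi, PySem.List.pyGetD_natCast, Int.toNat_natCast]
  rw [bBump, PySem.List.pySetD, hg, hi, PySem.List.pySet?_natCast t i.toNat _ hlen]
  simp only [Option.getD_some, setInc, Int.toNat_natCast]

lemma pvIncAt_eq_bBump (t : List Int) (i : Int) : pvIncAt t i = bBump t i 1 := rfl

-- characterization of a fold of in-range bumps
lemma foldl_bump_char {α : Type} (l : List α) (idx : α → Int) (w : α → Int) (t : List Int)
    (h : ∀ x ∈ l, 0 ≤ idx x ∧ idx x < (t.length : Int)) :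
    l.foldl (fun t x => bBump t (idx x) (w x)) t
      = applyW t (fun k => (l.map (fun x => if (idx x).toNat = k then w x else 0)).sum) := by
  induction l generalizing t with
  | nil => simp [applyW_zero]
  | cons x l ih =>
    obtain ⟨hx0, hxl⟩ := h x (by simp)
    rw [List.foldl_cons, bBump_eq_setInc _ _ _ hx0 hxl, setInc_eq_applyW,
      ih _ (by intro y hy; simpa [applyW] using h y (by simp [hy])), applyW_applyW]
    apply applyW_congr
    intro k hk
    simp [eq_comm]

lemma aPairLoop_eq (m a : Int) (rest : List Int) (t1 t2 : List Int) :
    aPairLoop m a rest (t1, t2) =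
      (rest.foldl (fun t b => pvIncAt t (hashFunc1 [a, b] m)) t1,
       rest.foldl (fun t b => pvIncAt t (hashFunc2 [a, b] m)) t2) := by
  induction rest generalizing t1 t2 with
  | nil => rfl
  | cons b rest ih => simp [aPairLoop, ih]

lemma aBasketLoop_eq (m : Int) (basket : List Int) (d : PySem.Dict Int Int) (t1 t2 : List Int) :
    aBasketLoop m basket (d, t1, t2) =
      (basket.foldl pvDictInc d,
       (pairsList basket).foldl (fun t p => pvIncAt t (hashFunc1 [p.1, p.2] m)) t1,
       (pairsList basket).foldl (fun t p => pvIncAt t (hashFunc2 [p.1, p.2] m)) t2) := by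
  induction basket generalizing d t1 t2 with
  | nil => rfl
  | cons a rest ih =>
    simp only [aBasketLoop, aPairLoop_eq, ih, pairsList, List.foldl_append, List.foldl_map,
      List.foldl_cons]

lemma pvDictInc_eq (d : PySem.Dict Int Int) (a : Int) :
    pvDictInc d a = d.insert a (d.getD a 0 + 1) := by
  by_cases h : d.contains a
  · simp [pvDictInc, h]
  · simp only [pvDictInc, h, Bool.false_eq_true, if_false,
      PySem.Dict.getD_of_not_contains d (0 : Int) (by simpa using h), zero_add]

-- hash values as Euclidean mod of residues (0 < m)
lemma hashFunc1_eq (a b m : Int) (hm : 0 < m) : hashFunc1 [a, b] m = (a * b) % m := by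
  simp [hashFunc1, PySem.Int.mod_eq_emod_of_pos hm]

lemma hashFunc2_eq (a b m : Int) (hm : 0 < m) : hashFunc2 [a, b] m = (a + b) % m := by
  simp [hashFunc2, PySem.Int.mod_eq_emod_of_pos hm]

lemma pairsList_map (f : Int → Int) (l : List Int) :
    pairsList (l.map f) = (pairsList l).map (fun p => (f p.1, f p.2)) := by
  induction l with
  | nil => rfl
  | cons a rest ih => simp [pairsList, ih, List.map_map, Function.comp_def]

-- sum over a Nodup list concentrated at one point
lemma sum_map_single (l : List Int) (x : Int) (f : Int → Int) (hnd : l.Nodup) :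
    (l.map (fun v => if v = x then f v else 0)).sum = if x ∈ l then f x else 0 := by
  induction l with
  | nil => simp
  | cons v l ih =>
    rw [List.nodup_cons] at hnd
    by_cases hvx : v = x
    · subst hvx
      simp [hnd.1, ih hnd.2]
    · simp only [List.map_cons, List.sum_cons, if_neg hvx, zero_add, ih hnd.2, List.mem_cons]
      rw [if_congr (Iff.symm (or_iff_right (Ne.symm hvx))) rfl rfl]

-- counting a mapped list by grouping over a covering Nodup list
lemma count_by_values (vals rs : List Int) (p : Int → Prop) [DecidablePred p]
    (hnd : vals.Nodup) (hsub : ∀ r ∈ rs, r ∈ vals) :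
    ((rs.countP (fun r => decide (p r))) : Int)
      = (vals.map (fun v => if p v then (rs.count v : Int) else 0)).sum := by
  induction rs with
  | nil => simp
  | cons x rs ih =>
    have hx : x ∈ vals := hsub x (by simp)
    have step : ∀ v : Int, (if p v then (((x :: rs).count v : Nat) : Int) else 0)
        = (if p v then (rs.count v : Int) else 0)
          + (if v = x then (if p v then (1:Int) else 0) else 0) := by
      intro v
      rcases eq_or_ne v x with hvx | hvx
      · subst hvx
        by_cases hp : p v
        · simp only [hp, if_true, List.count_cons, beq_self_eq_true]
          push_cast; ring
        · simp [hp]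
      · have hxv : (x == v) = false := by simp [Ne.symm hvx]
        by_cases hp : p v <;> simp [hp, hvx, List.count_cons, hxv]
    rw [List.map_congr_left (fun v _ => step v), PySem.List.sum_map_add_int,
      sum_map_single vals x _ hnd, if_pos hx, ← ih (fun r hr => hsub r (by simp [hr])),
      List.countP_cons]
    by_cases hp : p x <;> simp [hp]

def wdelta (x : Int) (rs : List Int) (r1 r2 : Int) : Int :=
  if r1 = r2 then (if x = r1 then (rs.count r1 : Int) else 0)
  else (if x = r1 then (rs.count r2 : Int) else 0) + (if x = r2 then (rs.count r1 : Int) else 0)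

lemma choose2_succ (n : Int) : (n + 1) * (n + 1 - 1) / 2 = n * (n - 1) / 2 + n := by
  have h : (n + 1) * (n + 1 - 1) = n * (n - 1) + n * 2 := by ring
  rw [h, Int.add_mul_ediv_right _ _ (by norm_num : (2:Int) ≠ 0)]

lemma count_cons_int (x r : Int) (rs : List Int) :
    ((x :: rs).count r : Int) = (rs.count r : Int) + (if x = r then 1 else 0) := by
  rcases eq_or_ne x r with h | h <;> simp [List.count_cons, h]

lemma wcnt_cons (x : Int) (rs : List Int) (r1 r2 : Int) :
    wcnt (x :: rs) r1 r2 = wcnt rs r1 r2 + wdelta x rs r1 r2 := by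
  unfold wcnt wdelta
  rcases eq_or_ne r1 r2 with h12 | h12
  · subst h12
    rcases eq_or_ne x r1 with hx | hx
    · rw [if_pos rfl, if_pos rfl, if_pos hx, count_cons_int, if_pos hx, choose2_succ]; simp
    · rw [if_pos rfl, if_pos rfl, if_neg hx, count_cons_int, if_neg hx, add_zero, add_zero]; simp
  · rw [if_neg h12, if_neg h12, if_neg h12, count_cons_int, count_cons_int]
    rcases eq_or_ne x r1 with hx1 | hx1
    · have hx2 : x ≠ r2 := by rw [hx1] at *; exact h12
      rw [if_pos hx1, if_pos hx1, if_neg hx2, if_neg hx2]; ring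
    · rcases eq_or_ne x r2 with hx2 | hx2
      · rw [if_neg hx1, if_neg hx1, if_pos hx2, if_pos hx2]; ring
      · rw [if_neg hx1, if_neg hx1, if_neg hx2, if_neg hx2]; ring

lemma sum_flatMap_int {α : Type} (l : List α) (f : α → List Int) :
    (l.flatMap f).sum = (l.map (fun a => (f a).sum)).sum := by
  rw [List.flatMap_def, List.sum_flatten, List.map_map]; rfl

lemma sum_rpairs (m : Int) (F : Int × Int → Int) :
    ((rpairsList m).map F).sum
      = ((PySem.List.pyRange 0 m 1).map (fun r1 =>
          ((PySem.List.pyRange r1 m 1).map (fun r2 => F (r1, r2))).sum)).sum := by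
  rw [rpairsList, List.map_flatMap, sum_flatMap_int]
  simp only [List.map_map, Function.comp_def]

lemma sum_wdelta (m : Int) (hm : 0 < m) (φ : Int → Int → Int) (hsym : ∀ a b, φ a b = φ b a)
    (x : Int) (hx : 0 ≤ x ∧ x < m) (rs : List Int) (hrs : ∀ r ∈ rs, 0 ≤ r ∧ r < m) (k : Int) :
    ((rpairsList m).map (fun q => if φ q.1 q.2 = k then wdelta x rs q.1 q.2 else 0)).sum
      = ((rs.map (fun b => φ x b)).count k : Int) := by
  set G : Int → Int := fun r => if φ x r = k then (rs.count r : Int) else 0 with hG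
  have key : ∀ r1 r2 : Int, (if φ r1 r2 = k then wdelta x rs r1 r2 else 0)
      = (if r1 = x then G r2 else 0) + (if r2 = x ∧ ¬ r1 = x then G r1 else 0) := by
    intro r1 r2
    unfold wdelta
    rcases eq_or_ne r1 r2 with h12 | h12
    · rcases eq_or_ne x r1 with hx1 | hx1
      · subst h12; simp [← hx1, hG]
      · subst h12; simp [hx1, Ne.symm hx1]
    · rcases eq_or_ne x r1 with hx1 | hx1
      · have h2 : ¬ r2 = x := by omega
        have h3 : ¬ x = r2 := by omega
        simp [← hx1, h2, h3, hG]
      · rcases eq_or_ne x r2 with hx2 | hx2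
        · have h2 : ¬ r1 = x := by omega
          simp [← hx2, hx1, h2]
          rw [hsym r1 x]
        · simp [hx1, hx2, Ne.symm hx1, Ne.symm hx2]
  calc ((rpairsList m).map (fun q => if φ q.1 q.2 = k then wdelta x rs q.1 q.2 else 0)).sum
      = ((rpairsList m).map (fun q => (if q.1 = x then G q.2 else 0)
          + (if q.2 = x ∧ ¬ q.1 = x then G q.1 else 0))).sum := by
        exact congrArg List.sum (List.map_congr_left (fun q _ => key q.1 q.2))
    _ = ((rpairsList m).map (fun q => if q.1 = x then G q.2 else 0)).sum
        + ((rpairsList m).map (fun q => if q.2 = x ∧ ¬ q.1 = x then G q.1 else 0)).sum := by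
        exact PySem.List.sum_map_add_int _ _ _
    _ = ((PySem.List.pyRange x m 1).map G).sum + ((PySem.List.pyRange 0 x 1).map G).sum := by
        congr 1
        · rw [sum_rpairs]
          have hinner : ∀ r1 : Int, ((PySem.List.pyRange r1 m 1).map
              (fun r2 => if r1 = x then G r2 else 0)).sum
              = if r1 = x then ((PySem.List.pyRange x m 1).map G).sum else 0 := by
            intro r1
            rcases eq_or_ne r1 x with h | h
            · subst h; simp
            · simp [h]
          rw [List.map_congr_left (fun r1 _ => hinner r1),
            sum_map_single _ x _ (PySem.List.nodup_pyRange_one 0 m),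
            if_pos (PySem.List.mem_pyRange_one.mpr ⟨hx.1, hx.2⟩)]
        · rw [sum_rpairs]
          have hinner : ∀ r1 ∈ PySem.List.pyRange 0 m 1, ((PySem.List.pyRange r1 m 1).map
              (fun r2 => if r2 = x ∧ ¬ r1 = x then G r1 else 0)).sum
              = if r1 < x then G r1 else 0 := by
            intro r1 _
            rcases eq_or_ne r1 x with h | h
            · subst h; simp
            · have hsingle := sum_map_single (PySem.List.pyRange r1 m 1) x (fun _ => G r1)
                (PySem.List.nodup_pyRange_one r1 m)
              have hrw : ∀ r2 : Int, (if r2 = x ∧ ¬ r1 = x then G r1 else 0)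
                  = (if r2 = x then G r1 else 0) := by
                intro r2; simp [h]
              rw [List.map_congr_left (fun r2 _ => hrw r2), hsingle]
              by_cases hc : r1 < x
              · rw [if_pos (PySem.List.mem_pyRange_one.mpr ⟨by omega, hx.2⟩), if_pos hc]
              · rw [if_neg (by intro hmem; rw [PySem.List.mem_pyRange_one] at hmem; omega),
                  if_neg hc]
          rw [List.map_congr_left hinner,
            PySem.List.pyRange_one_append 0 x m hx.1 (le_of_lt hx.2), List.map_append,
            List.sum_append]
          have h1 : ((PySem.List.pyRange 0 x 1).map (fun r1 => if r1 < x then G r1 else 0)).sum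
              = ((PySem.List.pyRange 0 x 1).map G).sum := by
            apply congrArg List.sum
            apply List.map_congr_left
            intro r1 hr1
            rw [PySem.List.mem_pyRange_one] at hr1
            rw [if_pos hr1.2]
          have h2 : ((PySem.List.pyRange x m 1).map (fun r1 => if r1 < x then G r1 else 0)).sum
              = 0 := by
            apply List.sum_eq_zero
            intro y hy
            rw [List.mem_map] at hy
            obtain ⟨r1, hr1, hy⟩ := hy
            rw [PySem.List.mem_pyRange_one] at hr1
            rw [if_neg (by omega)] at hy
            omega
          rw [h1, h2, add_zero]
    _ = ((PySem.List.pyRange 0 m 1).map G).sum := by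
        rw [PySem.List.pyRange_one_append 0 x m hx.1 (le_of_lt hx.2), List.map_append,
          List.sum_append, add_comm]
    _ = ((rs.map (fun b => φ x b)).count k : Int) := by
        have hc : ((rs.map fun b => φ x b).count k : Int)
            = ((rs.countP (fun r => decide (φ x r = k))) : Int) := by
          norm_cast
          rw [List.count_eq_countP, List.countP_map]
          apply List.countP_congr
          intro r _
          simp
        rw [hc, count_by_values (PySem.List.pyRange 0 m 1) rs (fun r => φ x r = k)
          (PySem.List.nodup_pyRange_one 0 m)
          (fun r hr => PySem.List.mem_pyRange_one.mpr ⟨(hrs r hr).1, (hrs r hr).2⟩)]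


lemma main_count (m : Int) (hm : 0 < m) (φ : Int → Int → Int) (hsym : ∀ a b, φ a b = φ b a)
    (rs : List Int) (hrs : ∀ r ∈ rs, 0 ≤ r ∧ r < m) (k : Int) :
    (((pairsList rs).map (fun p => φ p.1 p.2)).count k : Int)
      = ((rpairsList m).map (fun q => if φ q.1 q.2 = k then wcnt rs q.1 q.2 else 0)).sum := by
  induction rs with
  | nil =>
    rw [pairsList]
    simp only [List.map_nil, List.count_nil, Nat.cast_zero]
    symm
    apply List.sum_eq_zero
    intro y hy
    rw [List.mem_map] at hy
    obtain ⟨q, _, hy⟩ := hy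
    simp [wcnt] at hy
    omega
  | cons x rs ih =>
    have hx := hrs x (by simp)
    have hrs' : ∀ r ∈ rs, 0 ≤ r ∧ r < m := fun r hr => hrs r (by simp [hr])
    have hdist : ∀ q : Int × Int, (if φ q.1 q.2 = k then wcnt (x :: rs) q.1 q.2 else 0)
        = (if φ q.1 q.2 = k then wcnt rs q.1 q.2 else 0)
          + (if φ q.1 q.2 = k then wdelta x rs q.1 q.2 else 0) := by
      intro q
      rw [wcnt_cons]
      by_cases h : φ q.1 q.2 = k <;> simp [h]
    rw [List.map_congr_left (fun q _ => hdist q), PySem.List.sum_map_add_int,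
      ← ih hrs', sum_wdelta m hm φ hsym x hx rs hrs' k]
    rw [pairsList, List.map_append, List.count_append, List.map_map]
    push_cast
    rw [add_comm]
    congr 2


lemma sum_ite_eq_count {α : Type} (l : List α) (f : α → Int) (k : Int) :
    (l.map (fun x => if f x = k then (1:Int) else 0)).sum = ((l.map f).count k : Int) := by
  rw [List.count_eq_countP, List.countP_map,
    ← PySem.List.sum_map_ite_one_zero ((fun x => x == k) ∘ f) l]
  exact congrArg List.sum (List.map_congr_left (fun i _ => by simp [Function.comp_def]))

lemma length_bBump (t : List Int) (i n : Int) : (bBump t i n).length = t.length := by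
  rw [bBump]; exact PySem.List.length_pySetD t i _

lemma length_foldl_bBump {α : Type} (l : List α) (fi fn : α → Int) (t : List Int) :
    (l.foldl (fun t x => bBump t (fi x) (fn x)) t).length = t.length := by
  induction l generalizing t with
  | nil => rfl
  | cons x l ih => rw [List.foldl_cons, ih, length_bBump]

lemma mem_rpairsList (m : Int) (q : Int × Int) (hq : q ∈ rpairsList m) :
    0 ≤ q.1 ∧ q.1 ≤ q.2 ∧ q.2 < m := by
  rw [rpairsList, List.mem_flatMap] at hq
  obtain ⟨r1, hr1, hq⟩ := hq
  rw [List.mem_map] at hq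
  obtain ⟨r2, hr2, hq⟩ := hq
  rw [PySem.List.mem_pyRange_one] at hr1 hr2
  subst hq
  exact ⟨hr1.1, hr2.1, hr2.2⟩

def wKey (counts : PySem.Dict Int Int) (r1 r2 : Int) : Int :=
  if r1 = r2 then
    PySem.Int.floordiv (counts.getD r1 0 * (counts.getD r1 0 - 1)) 2
  else counts.getD r1 0 * counts.getD r2 0

def keysPairs (P : List Int) : List (Int × Int) :=
  P.flatMap (fun r1 => (P.filter (fun r2 => decide (r1 ≤ r2))).map (fun r2 => (r1, r2)))

lemma foldl_if_pair_split (l : List Int) (p : Int → Prop) [DecidablePred p]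
    (f g : List Int → Int → List Int) (tabs : List Int × List Int) :
    l.foldl (fun tabs r2 => if p r2 then (f tabs.1 r2, g tabs.2 r2) else tabs) tabs
      = ((l.filter (fun r2 => decide (p r2))).foldl f tabs.1,
         (l.filter (fun r2 => decide (p r2))).foldl g tabs.2) := by
  induction l generalizing tabs with
  | nil => rfl
  | cons a l ih =>
    by_cases h : p a <;> simp [List.filter_cons, h, ih]

lemma bResLoop_eq (m : Int) (counts : PySem.Dict Int Int) (t1 t2 : List Int) :
    bResLoop m counts (t1, t2)
      = ((keysPairs counts.keys).foldl
          (fun t q => bBump t (PySem.Int.mod (q.1 * q.2) m) (wKey counts q.1 q.2)) t1,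
         (keysPairs counts.keys).foldl
          (fun t q => bBump t (PySem.Int.mod (q.1 + q.2) m) (wKey counts q.1 q.2)) t2) := by
  show counts.keys.foldl (fun tabs r1 =>
      counts.keys.foldl (fun tabs r2 =>
        if r1 ≤ r2 then
          (bBump tabs.1 (PySem.Int.mod (r1 * r2) m) (wKey counts r1 r2),
           bBump tabs.2 (PySem.Int.mod (r1 + r2) m) (wKey counts r1 r2))
        else tabs) tabs) (t1, t2) = _
  rw [funext (fun tabs => funext (fun r1 => foldl_if_pair_split counts.keys (fun r2 => r1 ≤ r2)
    (fun t r2 => bBump t (PySem.Int.mod (r1 * r2) m) (wKey counts r1 r2))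
    (fun t r2 => bBump t (PySem.Int.mod (r1 + r2) m) (wKey counts r1 r2)) tabs))]
  rw [PySem.List.foldl_prod_mk
    (fun t r1 => (counts.keys.filter (fun r2 => decide (r1 ≤ r2))).foldl
      (fun t r2 => bBump t (PySem.Int.mod (r1 * r2) m) (wKey counts r1 r2)) t)
    (fun t r1 => (counts.keys.filter (fun r2 => decide (r1 ≤ r2))).foldl
      (fun t r2 => bBump t (PySem.Int.mod (r1 + r2) m) (wKey counts r1 r2)) t)
    counts.keys t1 t2]
  rw [keysPairs, List.foldl_flatMap, List.foldl_flatMap]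
  congr 1 <;>
    exact PySem.List.foldl_congr_mem _ _ _ _ (fun acc x _ => by simp [List.foldl_map])

lemma mem_rpairsList_iff (m : Int) (q : Int × Int) :
    q ∈ rpairsList m ↔ 0 ≤ q.1 ∧ q.1 ≤ q.2 ∧ q.2 < m := by
  constructor
  · exact mem_rpairsList m q
  · rintro ⟨h1, h2, h3⟩
    rw [rpairsList, List.mem_flatMap]
    exact ⟨q.1, PySem.List.mem_pyRange_one.mpr ⟨h1, by omega⟩,
      List.mem_map.mpr ⟨q.2, PySem.List.mem_pyRange_one.mpr ⟨h2, h3⟩, rfl⟩⟩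

lemma nodup_flatMap_fst (l : List Int) (f : Int → List (Int × Int)) (hl : l.Nodup)
    (h1 : ∀ a ∈ l, (f a).Nodup)
    (h2 : ∀ a ∈ l, ∀ q ∈ f a, q.1 = a) : (l.flatMap f).Nodup := by
  rw [List.nodup_flatMap]
  refine ⟨h1, ?_⟩
  refine hl.imp_of_mem ?_
  intro a b ha hb hab
  show (f a).Disjoint (f b)
  rw [List.disjoint_left]
  intro q hqa hqb
  exact hab ((h2 a ha q hqa).symm.trans (h2 b hb q hqb))

lemma nodup_rpairsList (m : Int) : (rpairsList m).Nodup := by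
  refine nodup_flatMap_fst _ _ (PySem.List.nodup_pyRange_one 0 m) ?_ ?_
  · intro a _
    exact List.Nodup.map (fun x y h => by simpa using h) (PySem.List.nodup_pyRange_one a m)
  · intro a _ q hq
    rw [List.mem_map] at hq
    obtain ⟨r2, _, rfl⟩ := hq
    rfl

lemma mem_keysPairs (P : List Int) (q : Int × Int) :
    q ∈ keysPairs P ↔ q.1 ∈ P ∧ q.2 ∈ P ∧ q.1 ≤ q.2 := by
  constructor
  · intro hq
    rw [keysPairs, List.mem_flatMap] at hq
    obtain ⟨r1, hr1, hq⟩ := hq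
    rw [List.mem_map] at hq
    obtain ⟨r2, hr2, rfl⟩ := hq
    rw [List.mem_filter] at hr2
    exact ⟨hr1, hr2.1, by simpa using hr2.2⟩
  · rintro ⟨h1, h2, h3⟩
    rw [keysPairs, List.mem_flatMap]
    exact ⟨q.1, h1, List.mem_map.mpr ⟨q.2, List.mem_filter.mpr ⟨h2, by simpa using h3⟩, rfl⟩⟩

lemma nodup_keysPairs (P : List Int) (hnd : P.Nodup) : (keysPairs P).Nodup := by
  refine nodup_flatMap_fst _ _ hnd ?_ ?_
  · intro a _
    exact List.Nodup.map (fun x y h => by simpa using h) (hnd.filter _)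
  · intro a _ q hq
    rw [List.mem_map] at hq
    obtain ⟨r2, _, rfl⟩ := hq
    rfl

lemma sum_map_filter_zero {α : Type} (l : List α) (F : α → Int) (p : α → Bool)
    (h : ∀ q ∈ l, p q = false → F q = 0) :
    (l.map F).sum = ((l.filter p).map F).sum := by
  induction l with
  | nil => rfl
  | cons a l ih =>
    have ih' := ih (fun q hq hp => h q (by simp [hq]) hp)
    cases hb : p a
    · simp [List.filter_cons, hb, h a (by simp) hb, ih']
    · simp [List.filter_cons, hb, ih']

lemma sum_keysPairs (m : Int) (P : List Int) (hnd : P.Nodup)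
    (hrange : ∀ r ∈ P, 0 ≤ r ∧ r < m) (F : Int × Int → Int)
    (hz : ∀ q : Int × Int, 0 ≤ q.1 → q.1 ≤ q.2 → q.2 < m → ¬(q.1 ∈ P ∧ q.2 ∈ P) → F q = 0) :
    ((keysPairs P).map F).sum = ((rpairsList m).map F).sum := by
  rw [sum_map_filter_zero (rpairsList m) F (fun q => decide (q.1 ∈ P) && decide (q.2 ∈ P))
    (by
      intro q hq hp
      have hr := (mem_rpairsList_iff m q).mp hq
      apply hz q hr.1 hr.2.1 hr.2.2
      intro hc
      simp [hc.1, hc.2] at hp)]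
  refine List.Perm.sum_eq (List.Perm.map F ?_)
  refine (List.perm_ext_iff_of_nodup (nodup_keysPairs P hnd)
    ((nodup_rpairsList m).filter _)).mpr ?_
  intro q
  rw [mem_keysPairs, List.mem_filter, mem_rpairsList_iff]
  constructor
  · rintro ⟨h1, h2, h3⟩
    have hb1 := hrange q.1 h1
    have hb2 := hrange q.2 h2
    exact ⟨⟨hb1.1, h3, hb2.2⟩, by simp [h1, h2]⟩
  · rintro ⟨hr, hp⟩
    simp only [Bool.and_eq_true, decide_eq_true_eq] at hp
    exact ⟨hp.1, hp.2, hr.2.1⟩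

lemma wKey_eq_wcnt (counts : PySem.Dict Int Int) (rs : List Int)
    (hcv : ∀ r : Int, counts.getD r 0 = (rs.count r : Int)) (r1 r2 : Int) :
    wKey counts r1 r2 = wcnt rs r1 r2 := by
  rw [wKey, wcnt, hcv r1, hcv r2, PySem.Int.floordiv_eq_ediv_of_pos (by norm_num)]

lemma counts_getD (m : Int) (hm : 0 < m) (basket : List Int) (r : Int) :
    (basket.foldl (fun (d : PySem.Dict Int Int) item =>
        d.insert (PySem.Int.mod item m) (d.getD (PySem.Int.mod item m) 0 + 1))
      PySem.Dict.empty).getD r 0 = ((basket.map (· % m)).count r : Int) := by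
  have h1 : (basket.foldl (fun (d : PySem.Dict Int Int) item =>
        d.insert (PySem.Int.mod item m) (d.getD (PySem.Int.mod item m) 0 + 1))
      PySem.Dict.empty).getD r 0
      = ((basket.map (fun item => PySem.Int.mod item m)).foldl
          (fun (d : PySem.Dict Int Int) x => d.insert x (d.getD x 0 + 1))
          PySem.Dict.empty).getD r 0 := by
    rw [List.foldl_map]
  rw [h1, PySem.Dict.getD_foldl_insert_add_one, PySem.Dict.getD_empty, zero_add,
    List.map_congr_left (fun (x : Int) _ => PySem.Int.mod_eq_emod_of_pos hm)]

lemma counts_keys_mem (m : Int) (hm : 0 < m) (basket : List Int) (r : Int) :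
    r ∈ (basket.foldl (fun (d : PySem.Dict Int Int) item =>
        d.insert (PySem.Int.mod item m) (d.getD (PySem.Int.mod item m) 0 + 1))
      PySem.Dict.empty).keys ↔ r ∈ basket.map (· % m) := by
  rw [PySem.Dict.keys_foldl_insert_key basket (fun item => PySem.Int.mod item m)
    (fun d x => d.getD (PySem.Int.mod x m) 0 + 1) PySem.Dict.empty,
    PySem.Dict.keys_empty, PySem.Set.update_nil_left, PySem.Set.mem_ofList,
    List.map_congr_left (fun (x : Int) _ => PySem.Int.mod_eq_emod_of_pos hm)]

lemma counts_keys_nodup (m : Int) (basket : List Int) :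
    (basket.foldl (fun (d : PySem.Dict Int Int) item =>
        d.insert (PySem.Int.mod item m) (d.getD (PySem.Int.mod item m) 0 + 1))
      PySem.Dict.empty).keys.Nodup :=
  PySem.Dict.nodup_keys_foldl_insert_key basket (fun item => PySem.Int.mod item m)
    (fun d x => d.getD (PySem.Int.mod x m) 0 + 1) PySem.Dict.empty PySem.Dict.nodup_keys_empty

lemma table_eq (m : Int) (hm : 0 < m) (ψ : Int → Int → Int)
    (hsym : ∀ a b, ψ a b = ψ b a) (hres : ∀ a b, ψ a b = ψ (a % m) (b % m))
    (hrange : ∀ a b, 0 ≤ ψ a b ∧ ψ a b < m)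
    (basket t : List Int) (ht : t.length = m.toNat) (counts : PySem.Dict Int Int)
    (hcv : ∀ r : Int, counts.getD r 0 = ((basket.map (· % m)).count r : Int))
    (hkm : ∀ r : Int, r ∈ counts.keys ↔ r ∈ basket.map (· % m))
    (hknd : counts.keys.Nodup) :
    (pairsList basket).foldl (fun t p => bBump t (ψ p.1 p.2) 1) t
      = (keysPairs counts.keys).foldl
          (fun t q => bBump t (ψ q.1 q.2) (wKey counts q.1 q.2)) t := by
  have hlen : ∀ a b : Int, ψ a b < (t.length : Int) := by
    intro a b; rw [ht]; have := (hrange a b).2; omega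
  rw [foldl_bump_char (pairsList basket) (fun p => ψ p.1 p.2) (fun _ => 1) t
    (fun p _ => ⟨(hrange p.1 p.2).1, hlen p.1 p.2⟩)]
  rw [foldl_bump_char (keysPairs counts.keys) (fun q => ψ q.1 q.2)
    (fun q => wKey counts q.1 q.2) t (fun q _ => ⟨(hrange q.1 q.2).1, hlen q.1 q.2⟩)]
  apply applyW_congr
  intro k hk
  have hkm' : (k : Int) < m := by rw [ht] at hk; omega
  have htn : ∀ a b : Int, (if (ψ a b).toNat = k then (1:Int) else 0)
      = (if ψ a b = (k : Int) then (1:Int) else 0) := by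
    intro a b
    have := (hrange a b).1
    by_cases h : ψ a b = (k : Int)
    · rw [if_pos (by omega), if_pos h]
    · rw [if_neg (by omega), if_neg h]
  have hL : ((pairsList basket).map
        (fun p => if (ψ p.1 p.2).toNat = k then (1:Int) else 0)).sum
      = (((pairsList basket).map (fun p => ψ p.1 p.2)).count ((k : Nat) : Int) : Int) := by
    rw [List.map_congr_left (fun p _ => htn p.1 p.2),
      sum_ite_eq_count (pairsList basket) (fun p => ψ p.1 p.2) (k : Int)]
  rw [hL]
  have hres' : (pairsList basket).map (fun p => ψ p.1 p.2)
      = (pairsList (basket.map (· % m))).map (fun p => ψ p.1 p.2) := by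
    rw [pairsList_map, List.map_map]
    exact List.map_congr_left (fun p _ => hres p.1 p.2)
  rw [hres']
  have hrs : ∀ r ∈ basket.map (· % m), 0 ≤ r ∧ r < m := by
    intro r hr
    rw [List.mem_map] at hr
    obtain ⟨x, _, rfl⟩ := hr
    exact ⟨Int.emod_nonneg x (by omega), Int.emod_lt_of_pos x hm⟩
  rw [main_count m hm ψ hsym (basket.map (· % m)) hrs (k : Int)]
  have hpt : ∀ q ∈ keysPairs counts.keys,
      (if (ψ q.1 q.2).toNat = k then wKey counts q.1 q.2 else 0)
      = (if ψ q.1 q.2 = (k : Int) then wcnt (basket.map (· % m)) q.1 q.2 else 0) := by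
    intro q _
    have hw := wKey_eq_wcnt counts (basket.map (· % m)) hcv q.1 q.2
    have := (hrange q.1 q.2).1
    by_cases h : ψ q.1 q.2 = (k : Int)
    · rw [if_pos h, if_pos (show (ψ q.1 q.2).toNat = k by omega), hw]
    · rw [if_neg h, if_neg (show ¬ (ψ q.1 q.2).toNat = k by omega)]
  rw [List.map_congr_left hpt]
  refine (sum_keysPairs m counts.keys hknd
    (fun r hr => hrs r ((hkm r).mp hr)) _ ?_).symm
  intro q hq1 hq2 hq3 hnk
  have hz : wcnt (basket.map (· % m)) q.1 q.2 = 0 := by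
    rcases Decidable.not_and_iff_not_or_not.mp hnk with hc | hc
    · have h0 : (basket.map (· % m)).count q.1 = 0 :=
        List.count_eq_zero.mpr (fun hmem => hc ((hkm q.1).mpr hmem))
      rw [wcnt, h0]
      split_ifs <;> norm_num
    · have h0 : (basket.map (· % m)).count q.2 = 0 :=
        List.count_eq_zero.mpr (fun hmem => hc ((hkm q.2).mpr hmem))
      rw [wcnt]
      split_ifs with h12
      · rw [h12, h0]; norm_num
      · rw [h0]; norm_num
  rw [hz]
  split_ifs <;> rfl

lemma basket_eq (m : Int) (hm : 0 < m) (basket : List Int) (d : PySem.Dict Int Int)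
    (t1 t2 : List Int) (h1 : t1.length = m.toNat) (h2 : t2.length = m.toNat) :
    aBasketLoop m basket (d, t1, t2)
      = ((basket.foldl (fun (dc : PySem.Dict Int Int × PySem.Dict Int Int) item =>
            (dc.1.insert item (dc.1.getD item 0 + 1),
             dc.2.insert (PySem.Int.mod item m)
               (dc.2.getD (PySem.Int.mod item m) 0 + 1))) (d, PySem.Dict.empty)).1,
         (bResLoop m (basket.foldl (fun (dc : PySem.Dict Int Int × PySem.Dict Int Int) item =>
            (dc.1.insert item (dc.1.getD item 0 + 1),
             dc.2.insert (PySem.Int.mod item m)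
               (dc.2.getD (PySem.Int.mod item m) 0 + 1))) (d, PySem.Dict.empty)).2
           (t1, t2)).1,
         (bResLoop m (basket.foldl (fun (dc : PySem.Dict Int Int × PySem.Dict Int Int) item =>
            (dc.1.insert item (dc.1.getD item 0 + 1),
             dc.2.insert (PySem.Int.mod item m)
               (dc.2.getD (PySem.Int.mod item m) 0 + 1))) (d, PySem.Dict.empty)).2
           (t1, t2)).2) := by
  have hsplit : basket.foldl (fun (dc : PySem.Dict Int Int × PySem.Dict Int Int) item =>
        (dc.1.insert item (dc.1.getD item 0 + 1),
         dc.2.insert (PySem.Int.mod item m) (dc.2.getD (PySem.Int.mod item m) 0 + 1)))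
        (d, PySem.Dict.empty)
      = (basket.foldl (fun d item => d.insert item (d.getD item 0 + 1)) d,
         basket.foldl (fun (c : PySem.Dict Int Int) item =>
           c.insert (PySem.Int.mod item m) (c.getD (PySem.Int.mod item m) 0 + 1))
           PySem.Dict.empty) :=
    PySem.List.foldl_prod_mk (fun (d : PySem.Dict Int Int) item =>
        d.insert item (d.getD item 0 + 1))
      (fun (c : PySem.Dict Int Int) item =>
        c.insert (PySem.Int.mod item m) (c.getD (PySem.Int.mod item m) 0 + 1))
      basket d PySem.Dict.empty
  set C : PySem.Dict Int Int := basket.foldl (fun (c : PySem.Dict Int Int) item =>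
      c.insert (PySem.Int.mod item m) (c.getD (PySem.Int.mod item m) 0 + 1))
    PySem.Dict.empty with hC
  rw [aBasketLoop_eq]
  simp only [hsplit, bResLoop_eq]
  refine congrArg₂ Prod.mk ?_ (congrArg₂ Prod.mk ?_ ?_)
  · exact PySem.List.foldl_congr_mem basket _ _ d (fun d a _ => pvDictInc_eq d a)
  · have hA : ∀ (t : List Int) (p : Int × Int),
        pvIncAt t (hashFunc1 [p.1, p.2] m) = bBump t ((p.1 * p.2) % m) 1 := by
      intro t p; rw [pvIncAt_eq_bBump, hashFunc1_eq p.1 p.2 m hm]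
    rw [PySem.List.foldl_congr_mem _ _ _ t1 (fun t p _ => hA t p)]
    have hB : ∀ (t : List Int) (q : Int × Int),
        bBump t (PySem.Int.mod (q.1 * q.2) m) (wKey C q.1 q.2)
        = bBump t ((q.1 * q.2) % m) (wKey C q.1 q.2) := by
      intro t q; rw [PySem.Int.mod_eq_emod_of_pos hm]
    rw [PySem.List.foldl_congr_mem _ _ _ t1 (fun t q _ => hB t q)]
    exact table_eq m hm (fun a b => (a * b) % m)
      (fun a b => by show a * b % m = b * a % m; rw [mul_comm])
      (fun a b => Int.mul_emod a b m)
      (fun a b => ⟨Int.emod_nonneg _ (by omega), Int.emod_lt_of_pos _ hm⟩) basket t1 h1 C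
      (fun r => by rw [hC]; exact counts_getD m hm basket r)
      (fun r => by rw [hC]; exact counts_keys_mem m hm basket r)
      (by rw [hC]; exact counts_keys_nodup m basket)
  · have hA : ∀ (t : List Int) (p : Int × Int),
        pvIncAt t (hashFunc2 [p.1, p.2] m) = bBump t ((p.1 + p.2) % m) 1 := by
      intro t p; rw [pvIncAt_eq_bBump, hashFunc2_eq p.1 p.2 m hm]
    rw [PySem.List.foldl_congr_mem _ _ _ t2 (fun t p _ => hA t p)]
    have hB : ∀ (t : List Int) (q : Int × Int),
        bBump t (PySem.Int.mod (q.1 + q.2) m) (wKey C q.1 q.2)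
        = bBump t ((q.1 + q.2) % m) (wKey C q.1 q.2) := by
      intro t q; rw [PySem.Int.mod_eq_emod_of_pos hm]
    rw [PySem.List.foldl_congr_mem _ _ _ t2 (fun t q _ => hB t q)]
    exact table_eq m hm (fun a b => (a + b) % m)
      (fun a b => by show (a + b) % m = (b + a) % m; rw [add_comm])
      (fun a b => Int.add_emod a b m)
      (fun a b => ⟨Int.emod_nonneg _ (by omega), Int.emod_lt_of_pos _ hm⟩) basket t2 h2 C
      (fun r => by rw [hC]; exact counts_getD m hm basket r)
      (fun r => by rw [hC]; exact counts_keys_mem m hm basket r)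
      (by rw [hC]; exact counts_keys_nodup m basket)

lemma fold_both (m : Int) (hm : 0 < m) (txs : List (List Int)) :
    ∀ (d : PySem.Dict Int Int) (t1 t2 : List Int),
      t1.length = m.toNat → t2.length = m.toNat →
      txs.foldl (fun st basket => aBasketLoop m basket st) (d, t1, t2)
        = txs.foldl (fun st basket =>
            let dc := basket.foldl
                (fun (dc : PySem.Dict Int Int × PySem.Dict Int Int) item =>
                  let r := PySem.Int.mod item m
                  (dc.1.insert item (dc.1.getD item 0 + 1),
                   dc.2.insert r (dc.2.getD r 0 + 1)))
              (st.1, PySem.Dict.empty)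
            let tabs := bResLoop m dc.2 (st.2.1, st.2.2)
            (dc.1, tabs.1, tabs.2)) (d, t1, t2) := by
  induction txs with
  | nil => intro d t1 t2 _ _; rfl
  | cons basket txs ih =>
    intro d t1 t2 h1 h2
    rw [List.foldl_cons, List.foldl_cons, basket_eq m hm basket d t1 t2 h1 h2]
    refine ih _ _ _ ?_ ?_
    · rw [bResLoop_eq]
      exact (length_foldl_bBump (keysPairs _) (fun q => PySem.Int.mod (q.1 * q.2) m)
        (fun q => wKey _ q.1 q.2) t1).trans h1
    · rw [bResLoop_eq]
      exact (length_foldl_bBump (keysPairs _) (fun q => PySem.Int.mod (q.1 + q.2) m)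
        (fun q => wKey _ q.1 q.2) t2).trans h2

lemma init_tab (m : Int) :
    (PySem.List.pyRange 0 m 1).map (fun _ => (0:Int)) = List.replicate m.toNat 0 := by
  apply List.eq_replicate_iff.mpr
  constructor
  · rw [List.length_map, PySem.List.length_pyRange_one]; norm_num
  · intro b hb
    rw [List.mem_map] at hb
    obtain ⟨_, _, rfl⟩ := hb
    rfl

-- ===== VERDICT (by name: the statement is the Claim_ definition above) =====
theorem first_pass_spec : Claim_equal_first_pass := by
  intro transactions m _ hpre
  have hm : 0 < m := hpre
  show first_pass transactions m = first_pass_alt transactions m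
  rw [first_pass, first_pass_alt]
  rw [init_tab, fold_both m hm transactions PySem.Dict.empty
    (List.replicate m.toNat 0) (List.replicate m.toNat 0)
    (List.length_replicate) (List.length_replicate)]
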